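-- pv_equiv track=rewrite | github.com/Code0987/sde-journey | dsa/problems/min_prefix_permutations.py | countMinimumCharacters
-- ===== SOURCE A (Python) =====
-- from typing import List
-- from collections import Counter, defaultdict
--
-- def countMinimumCharacters(s: str, arr: List[str]) -> List[int]:
--     needed_counts = [Counter(word) for word in arr]
--     matched_counts = [defaultdict(int) for _ in arr]
--     matched_complete = [0] * len(arr)
--     result = [-1] * len(arr)
--
--     total_to_match = [len(c) for c in needed_counts]
--     completed = [False] * len(arr)
--     active = set(range(len(arr)))
--
--     for idx, ch in enumerate(s):
--         remove_set = set()
--         for i in active: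
--             if ch in needed_counts[i]:
--                 if matched_counts[i][ch] < needed_counts[i][ch]:
--                     matched_counts[i][ch] += 1
--                     if matched_counts[i][ch] == needed_counts[i][ch]:
--                         matched_complete[i] += 1
--                         if matched_complete[i] == total_to_match[i]:
--                             result[i] = idx + 1
--                             remove_set.add(i)
--         active -= remove_set
--         if not active:
--             break
--
--     return result
-- ===== SOURCE B (Python) =====
-- from collections import Counter
--
-- def countMinimumCharacters(s, arr):
--     # Per-word pass over s, counting DOWN the word's Counter; no shared state,
--     # no active set, no per-word matched dicts.
--     res = []
--     for word in arr:
--         need = Counter(word)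
--         pending = len(need)          # distinct characters still unsatisfied
--         ans = -1
--         for idx, ch in enumerate(s):
--             k = need.get(ch, 0)
--             if k > 0:
--                 need[ch] = k - 1
--                 if k == 1:
--                     pending -= 1
--                     if pending == 0:
--                         ans = idx + 1
--                         break
--         res.append(ans)
--     return res
-- ===== Notes on version B (the rewrite author's own statement) =====
-- stated objective: simpler
-- what changed: B swaps the loop nesting: instead of A's single sweep over s that updates shared per-word state (a list of matched-count dicts, a matched-complete array and a shrinking active set, with a remove-set rebuilt per character), B handles each word independently with one countdown scan of s that decrements the word's Counter and a single pending-distinct-chars counter, breaking as soon as the word is satisfied.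
import Mathlib
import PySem

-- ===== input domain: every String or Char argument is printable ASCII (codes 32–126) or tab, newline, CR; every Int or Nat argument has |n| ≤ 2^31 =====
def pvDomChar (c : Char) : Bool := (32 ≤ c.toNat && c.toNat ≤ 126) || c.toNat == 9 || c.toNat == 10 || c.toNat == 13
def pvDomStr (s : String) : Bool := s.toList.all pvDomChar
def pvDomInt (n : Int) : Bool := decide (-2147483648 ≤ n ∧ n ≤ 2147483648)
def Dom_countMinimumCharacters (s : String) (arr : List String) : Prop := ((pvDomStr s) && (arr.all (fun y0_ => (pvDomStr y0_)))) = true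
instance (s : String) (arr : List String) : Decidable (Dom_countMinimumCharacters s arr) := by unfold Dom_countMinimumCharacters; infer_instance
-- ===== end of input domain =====

-- B replaces A's single sweep over s with shared per-word state (matched_counts / matched_complete / active set)
-- by an independent per-word countdown scan of s (words in the outer loop): same value everywhere, plainer code.

-- ===== PORT A =====
-- state of A's loop: the four mutable containers (the unused `completed` list of the Python is dead code and omitted).
-- `active = set(range(len(arr)))` holds distinct small Nats; Python's set-iteration order cannot affect the result
-- (each iteration only touches the per-word slots of its own index), so it is modelled as the ascending list.
structure AState where
  matched : List (PySem.Dict Char Int)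
  complete : List Int
  result : List Int
  active : List Nat

-- body of `for i in active:` (reading `matched_counts[i][ch]` on a defaultdict is getD ... 0; the
-- insertion of a 0 value that the Python defaultdict performs is unobservable afterwards)
def aInner (needed : List (PySem.Dict Char Int)) (total : List Int) (idx : Int) (ch : Char)
    (acc : AState × List Nat) (i : Nat) : AState × List Nat :=
  let st := acc.1
  let rem := acc.2
  let need := needed.getD i PySem.Dict.empty
  if need.contains ch then
    let m := st.matched.getD i PySem.Dict.empty
    if m.getD ch 0 < need.getD ch 0 then
      let m' := m.insert ch (m.getD ch 0 + 1)
      let st1 : AState := { st with matched := st.matched.set i m' }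
      if m'.getD ch 0 == need.getD ch 0 then
        let c' := st1.complete.getD i 0 + 1
        let st2 : AState := { st1 with complete := st1.complete.set i c' }
        if c' == total.getD i 0 then
          ({ st2 with result := st2.result.set i (idx + 1) }, rem ++ [i])
        else (st2, rem)
      else (st1, rem)
    else (st, rem)
  else (st, rem)

-- body of `for idx, ch in enumerate(s):` (the `if not active: break` is the isEmpty guard)
def aStep (needed : List (PySem.Dict Char Int)) (total : List Int)
    (st : AState) (p : Int × Char) : AState :=
  if st.active.isEmpty then st
  else
    let r := st.active.foldl (aInner needed total p.1 p.2) (st, [])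
    { r.1 with active := r.1.active.filter (fun i => !(r.2.contains i)) }

def countMinimumCharacters (s : String) (arr : List String) : List Int :=
  let needed := arr.map (fun w => PySem.Dict.counter w.toList)
  let n := arr.length
  let total := needed.map (fun c => (c.size : Int))
  let init : AState := ⟨List.replicate n PySem.Dict.empty, List.replicate n 0,
                        List.replicate n (-1), List.range n⟩
  ((PySem.List.enumerate s.toList 0).foldl (aStep needed total) init).result

-- ===== PORT B =====
-- `for idx, ch in enumerate(s): ...` with early break, counting need down
def bLoop (need : PySem.Dict Char Int) (pending : Int) : List (Int × Char) → Int
  | [] => -1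
  | (idx, ch) :: rest =>
    let k := need.getD ch 0
    if 0 < k then
      let need' := need.insert ch (k - 1)
      if k == 1 then
        (if pending - 1 == 0 then idx + 1 else bLoop need' (pending - 1) rest)
      else bLoop need' pending rest
    else bLoop need pending rest

def countMinimumCharacters_alt (s : String) (arr : List String) : List Int :=
  arr.map (fun word =>
    let need := PySem.Dict.counter word.toList
    let pending : Int := (need.size : Int)
    bLoop need pending (PySem.List.enumerate s.toList 0))

-- ===== PRECONDITION & SPEC =====
def Spec_countMinimumCharacters (s : String) (arr : List String) (out : List Int) : Prop :=
  out = countMinimumCharacters_alt s arr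
instance (s : String) (arr : List String) (out : List Int) : Decidable (Spec_countMinimumCharacters s arr out) := by
  unfold Spec_countMinimumCharacters; infer_instance

-- ===== CLAIM (what is proved, stated in full; the proofs are below) =====
def Claim_equal_countMinimumCharacters : Prop := ∀ (s : String) (arr : List String), Dom_countMinimumCharacters s arr → Spec_countMinimumCharacters s arr (countMinimumCharacters s arr)

-- ===== LEMMAS AND PROOFS =====

-- per-word abstract state: either finished with answer v, or still scanning
inductive WSt
  | done (v : Int)
  | run (need : PySem.Dict Char Int) (pending : Int)

def wstep (idx : Int) (ch : Char) : WSt → WSt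
  | .done v => .done v
  | .run need pending =>
    let k := need.getD ch 0
    if 0 < k then
      if k == 1 then
        (if pending - 1 == 0 then .done (idx + 1) else .run (need.insert ch (k - 1)) (pending - 1))
      else .run (need.insert ch (k - 1)) pending
    else .run need pending

def wrun (ps : List (Int × Char)) (w : WSt) : WSt := ps.foldl (fun w p => wstep p.1 p.2 w) w

def wext : WSt → Int
  | .done v => v
  | .run _ _ => -1

theorem wrun_done (ps : List (Int × Char)) (v : Int) : wrun ps (.done v) = .done v := by
  induction ps with
  | nil => rfl
  | cons p rest ih => simpa [wrun, wstep] using ih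

theorem bLoop_eq_wrun (ps : List (Int × Char)) : ∀ (need : PySem.Dict Char Int) (pending : Int),
    bLoop need pending ps = wext (wrun ps (.run need pending)) := by
  induction ps with
  | nil => intro need pending; rfl
  | cons p rest ih =>
    intro need pending
    obtain ⟨idx, ch⟩ := p
    show bLoop need pending ((idx, ch) :: rest) = wext (wrun rest (wstep idx ch (.run need pending)))
    simp only [bLoop, wstep]
    split_ifs with h1 h2 h3
    · rw [wrun_done]; rfl
    · exact ih _ _
    · exact ih _ _
    · exact ih _ _

-- A's per-word body as a pure function of the slots of one word
def aOne (need : PySem.Dict Char Int) (tot : Int) (idx : Int) (ch : Char)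
    (m : PySem.Dict Char Int) (c r : Int) : PySem.Dict Char Int × Int × Int × Bool :=
  if need.contains ch then
    if m.getD ch 0 < need.getD ch 0 then
      let m' := m.insert ch (m.getD ch 0 + 1)
      if m'.getD ch 0 == need.getD ch 0 then
        if c + 1 == tot then (m', c + 1, idx + 1, true) else (m', c + 1, r, false)
      else (m', c, r, false)
    else (m, c, r, false)
  else (m, c, r, false)

def projA (st : AState) (j : Nat) : PySem.Dict Char Int × Int × Int :=
  (st.matched.getD j PySem.Dict.empty, st.complete.getD j 0, st.result.getD j (-1))

def aOneAt (needed : List (PySem.Dict Char Int)) (total : List Int) (idx : Int) (ch : Char)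
    (st : AState) (j : Nat) : PySem.Dict Char Int × Int × Int × Bool :=
  aOne (needed.getD j PySem.Dict.empty) (total.getD j 0) idx ch
    (st.matched.getD j PySem.Dict.empty) (st.complete.getD j 0) (st.result.getD j (-1))

theorem projA_set_ne (st : AState) (i j : Nat) (hne : j ≠ i) (m : PySem.Dict Char Int) (c r : Int) :
    projA ⟨st.matched.set i m, st.complete.set i c, st.result.set i r, st.active⟩ j = projA st j := by
  simp [projA, List.getD, List.getElem?_set_ne (fun h => hne h.symm)]

theorem projA_set_self (st : AState) (i : Nat)
    (h1 : i < st.matched.length) (h2 : i < st.complete.length) (h3 : i < st.result.length)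
    (m : PySem.Dict Char Int) (c r : Int) :
    projA ⟨st.matched.set i m, st.complete.set i c, st.result.set i r, st.active⟩ i = (m, c, r) := by
  simp [projA, List.getD, h1, h2, h3]

theorem aInner_eq (needed : List (PySem.Dict Char Int)) (total : List Int) (idx : Int) (ch : Char)
    (st : AState) (rem : List Nat) (i : Nat)
    (h1 : i < st.matched.length) (h2 : i < st.complete.length) (h3 : i < st.result.length) :
    aInner needed total idx ch (st, rem) i =
      (⟨st.matched.set i (aOneAt needed total idx ch st i).1,
        st.complete.set i (aOneAt needed total idx ch st i).2.1,
        st.result.set i (aOneAt needed total idx ch st i).2.2.1,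
        st.active⟩,
       if (aOneAt needed total idx ch st i).2.2.2 then rem ++ [i] else rem) := by
  obtain ⟨ml, cl, rl, al⟩ := st
  simp only [aInner, aOneAt, aOne] at *
  have hms : ml.set i (ml.getD i PySem.Dict.empty) = ml := by
    rw [List.getD_eq_getElem _ _ h1]; exact List.set_getElem_self ..
  have hcs : cl.set i (cl.getD i 0) = cl := by
    rw [List.getD_eq_getElem _ _ h2]; exact List.set_getElem_self ..
  have hrs : rl.set i (rl.getD i (-1)) = rl := by
    rw [List.getD_eq_getElem _ _ h3]; exact List.set_getElem_self ..
  split_ifs with g1 g2 g3 g4 <;> simp_all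

-- the relation tying one word's A-slots (matched, complete, result) + activity flag to the abstract state
def RelW (need : PySem.Dict Char Int) (tot : Int)
    (q : PySem.Dict Char Int × Int × Int) (act : Bool) : WSt → Prop
  | .done v => act = false ∧ q.2.2 = v
  | .run nd p => act = true ∧ q.2.2 = -1 ∧ q.2.1 + p = tot ∧
      ∀ ch, 0 ≤ q.1.getD ch 0 ∧ 0 ≤ nd.getD ch 0 ∧ q.1.getD ch 0 + nd.getD ch 0 = need.getD ch 0

theorem aOne_wstep (need : PySem.Dict Char Int) (tot idx : Int) (ch : Char)
    (q : PySem.Dict Char Int × Int × Int) (nd : PySem.Dict Char Int) (p : Int)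
    (hcont : ∀ ch', need.contains ch' = true ↔ 0 < need.getD ch' 0)
    (hrel : RelW need tot q true (.run nd p)) :
    RelW need tot ((aOne need tot idx ch q.1 q.2.1 q.2.2).1,
                   (aOne need tot idx ch q.1 q.2.1 q.2.2).2.1,
                   (aOne need tot idx ch q.1 q.2.1 q.2.2).2.2.1)
      (!(aOne need tot idx ch q.1 q.2.1 q.2.2).2.2.2) (wstep idx ch (.run nd p)) := by
  obtain ⟨m, c, r⟩ := q
  obtain ⟨-, hr, hcp, hpt⟩ := hrel
  simp only at hr hcp hpt ⊢
  obtain ⟨hm0, hnd0, hsum⟩ := (hpt ch : _)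
  simp only [aOne, wstep]
  by_cases hk : 0 < nd.getD ch 0
  · -- A's two guards hold
    have hco : need.contains ch = true := (hcont ch).mpr (by omega)
    have hlt : m.getD ch 0 < need.getD ch 0 := by omega
    rw [if_pos hco, if_pos hlt, if_pos hk]
    have hget : (m.insert ch (m.getD ch 0 + 1)).getD ch 0 = m.getD ch 0 + 1 := by
      simp
    by_cases h1 : nd.getD ch 0 = 1
    · have heqA : ((m.insert ch (m.getD ch 0 + 1)).getD ch 0 == need.getD ch 0) = true := by
        simp [hget]; omega
      rw [if_pos heqA, if_pos (by simp [h1] : (nd.getD ch 0 == 1) = true)]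
      by_cases hp1 : p - 1 = 0
      · have : (c + 1 == tot) = true := by simp; omega
        rw [if_pos this, if_pos (by simp [hp1] : (p - 1 == 0) = true)]
        exact ⟨rfl, rfl⟩
      · have : (c + 1 == tot) = false := by simp; omega
        rw [if_neg (by simp_all), if_neg (by simp [hp1])]
        simp only [RelW]
        refine ⟨rfl, hr, by omega, fun ch' => ?_⟩
        obtain ⟨a1, a2, a3⟩ := hpt ch'
        by_cases hcc : ch' = ch
        · subst hcc; simp; omega
        · simp [PySem.Dict.getD_insert, hcc]; omega
    · have heqA : ((m.insert ch (m.getD ch 0 + 1)).getD ch 0 == need.getD ch 0) = false := by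
        simp [hget]; omega
      rw [if_neg (by simp_all), if_neg (by simp [h1])]
      simp only [RelW]
      refine ⟨rfl, hr, by omega, fun ch' => ?_⟩
      obtain ⟨a1, a2, a3⟩ := hpt ch'
      by_cases hcc : ch' = ch
      · subst hcc; simp; omega
      · simp [PySem.Dict.getD_insert, hcc]; omega
  · -- nd[ch] = 0: A skips too
    rw [if_neg hk]
    have hskip : (if need.contains ch = true then
        (if m.getD ch 0 < need.getD ch 0 then
          (if (m.insert ch (m.getD ch 0 + 1)).getD ch 0 == need.getD ch 0 then
            (if c + 1 == tot then (m.insert ch (m.getD ch 0 + 1), c + 1, idx + 1, true)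
             else (m.insert ch (m.getD ch 0 + 1), c + 1, r, false))
           else (m.insert ch (m.getD ch 0 + 1), c, r, false))
         else (m, c, r, false))
       else (m, c, r, false)) = (m, c, r, false) := by
      by_cases hco : need.contains ch = true
      · rw [if_pos hco]
        have : ¬ m.getD ch 0 < need.getD ch 0 := by omega
        rw [if_neg this]
      · rw [if_neg hco]
    rw [hskip]
    exact ⟨rfl, hr, hcp, hpt⟩

def GoodA (needed : List (PySem.Dict Char Int)) (total : List Int)
    (st : AState) (ws : List WSt) : Prop :=
  st.matched.length = needed.length ∧ st.complete.length = needed.length ∧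
  st.result.length = needed.length ∧ ws.length = needed.length ∧
  st.active.Nodup ∧ (∀ i ∈ st.active, i < needed.length) ∧
  ∀ j, j < needed.length →
    RelW (needed.getD j PySem.Dict.empty) (total.getD j 0) (projA st j)
      (st.active.contains j) (ws.getD j (.done 0))

theorem innerFold (needed : List (PySem.Dict Char Int)) (total : List Int) (idx : Int) (ch : Char) :
    ∀ (act : List Nat) (st : AState) (rem : List Nat), act.Nodup →
    (∀ i ∈ act, i < st.matched.length ∧ i < st.complete.length ∧ i < st.result.length) →
    (act.foldl (aInner needed total idx ch) (st, rem)).1.matched.length = st.matched.length ∧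
    (act.foldl (aInner needed total idx ch) (st, rem)).1.complete.length = st.complete.length ∧
    (act.foldl (aInner needed total idx ch) (st, rem)).1.result.length = st.result.length ∧
    (act.foldl (aInner needed total idx ch) (st, rem)).1.active = st.active ∧
    (act.foldl (aInner needed total idx ch) (st, rem)).2 =
      rem ++ act.filter (fun j => (aOneAt needed total idx ch st j).2.2.2) ∧
    (∀ j : Nat, projA (act.foldl (aInner needed total idx ch) (st, rem)).1 j =
      if j ∈ act then ((aOneAt needed total idx ch st j).1, (aOneAt needed total idx ch st j).2.1,
                       (aOneAt needed total idx ch st j).2.2.1)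
      else projA st j) := by
  intro act
  induction act with
  | nil => intro st rem _ _; simp
  | cons i rest ih =>
    intro st rem hnd hb
    obtain ⟨h1, h2, h3⟩ := hb i (List.mem_cons_self)
    have hstep := aInner_eq needed total idx ch st rem i h1 h2 h3
    set o := aOneAt needed total idx ch st i with ho
    set st1 : AState := ⟨st.matched.set i o.1, st.complete.set i o.2.1, st.result.set i o.2.2.1, st.active⟩ with hst1
    have hfold : (i :: rest).foldl (aInner needed total idx ch) (st, rem) =
        rest.foldl (aInner needed total idx ch) (st1, if o.2.2.2 then rem ++ [i] else rem) := by
      rw [List.foldl_cons, hstep]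
    have hnd' : rest.Nodup := hnd.of_cons
    have hnin : i ∉ rest := (List.nodup_cons.mp hnd).1
    have hb1 : ∀ j ∈ rest, j < st1.matched.length ∧ j < st1.complete.length ∧ j < st1.result.length := by
      intro j hj
      have := hb j (List.mem_cons_of_mem _ hj)
      simpa [hst1] using this
    have hproj1 : ∀ j ∈ rest, projA st1 j = projA st j := by
      intro j hj
      exact projA_set_ne st i j (fun h => hnin (h ▸ hj)) _ _ _
    have haux : ∀ j ∈ rest, aOneAt needed total idx ch st1 j = aOneAt needed total idx ch st j := by
      intro j hj
      have := hproj1 j hj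
      simp only [projA, Prod.mk.injEq] at this
      unfold aOneAt
      rw [this.1, this.2.1, this.2.2]
    obtain ⟨l1, l2, l3, l4, l5, l6⟩ := ih st1 (if o.2.2.2 then rem ++ [i] else rem) hnd' hb1
    refine ⟨?_, ?_, ?_, ?_, ?_, ?_⟩
    · rw [hfold]; rw [l1]; simp [hst1]
    · rw [hfold]; rw [l2]; simp [hst1]
    · rw [hfold]; rw [l3]; simp [hst1]
    · rw [hfold]; rw [l4]
    · rw [hfold, l5]
      rw [List.filter_cons]
      have hfeq : rest.filter (fun j => (aOneAt needed total idx ch st1 j).2.2.2) =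
          rest.filter (fun j => (aOneAt needed total idx ch st j).2.2.2) := by
        apply List.filter_congr
        intro j hj; rw [haux j hj]
      rw [hfeq]
      simp only [ho]
      by_cases hf : (aOneAt needed total idx ch st i).2.2.2 = true
      · simp [hf]
      · simp [hf]
    · intro j
      rw [hfold, l6 j]
      by_cases hj : j ∈ rest
      · simp [hj, haux j hj, List.mem_cons]
      · by_cases hji : j = i
        · subst hji
          simp [hnin, projA_set_self st j h1 h2 h3, ho, hst1]
        · simp [hj, hji, List.mem_cons]
          exact projA_set_ne st i j hji _ _ _

theorem mapGetD_wstep (ws : List WSt) (f : WSt → WSt) (j : Nat) (h : j < ws.length) :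
    (ws.map f).getD j (.done 0) = f (ws.getD j (.done 0)) := by
  rw [List.getD_eq_getElem _ _ (by simpa using h), List.getElem_map, List.getD_eq_getElem _ _ h]

theorem good_step (needed : List (PySem.Dict Char Int)) (total : List Int)
    (st : AState) (ws : List WSt) (p : Int × Char)
    (hcont : ∀ j, j < needed.length → ∀ ch',
      (needed.getD j PySem.Dict.empty).contains ch' = true ↔ 0 < (needed.getD j PySem.Dict.empty).getD ch' 0)
    (hg : GoodA needed total st ws) :
    GoodA needed total (aStep needed total st p) (ws.map (wstep p.1 p.2)) := by
  obtain ⟨g1, g2, g3, g4, g5, g6, g7⟩ := hg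
  by_cases hemp : st.active.isEmpty
  · have hae : st.active = [] := List.isEmpty_iff.mp hemp
    unfold aStep
    rw [if_pos hemp]
    refine ⟨g1, g2, g3, by simpa using g4, g5, g6, ?_⟩
    intro j hj
    have hrel := g7 j hj
    have hjw : j < ws.length := by omega
    rw [mapGetD_wstep ws _ j hjw]
    cases hw : ws.getD j (.done 0) with
    | done v =>
      rw [hw] at hrel
      exact ⟨hrel.1, hrel.2⟩
    | run nd pp =>
      rw [hw] at hrel
      have : st.active.contains j = true := hrel.1
      rw [hae] at this
      simp at this
  · unfold aStep
    rw [if_neg hemp]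
    have hbounds : ∀ i ∈ st.active, i < st.matched.length ∧ i < st.complete.length ∧ i < st.result.length := by
      intro i hi; have := g6 i hi; omega
    obtain ⟨l1, l2, l3, l4, l5, l6⟩ := innerFold needed total p.1 p.2 st.active st [] g5 hbounds
    set F := st.active.foldl (aInner needed total p.1 p.2) (st, []) with hF
    have hremmem : ∀ j : Nat, j ∈ F.2 ↔
        (j ∈ st.active ∧ (aOneAt needed total p.1 p.2 st j).2.2.2 = true) := by
      intro j
      rw [l5]
      simp [List.mem_filter]
    have hactmem : ∀ j : Nat,
        (j ∈ F.1.active.filter (fun i => !(F.2.contains i))) ↔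
        (j ∈ st.active ∧ ¬ (aOneAt needed total p.1 p.2 st j).2.2.2 = true) := by
      intro j
      rw [List.mem_filter, l4]
      have hb : ((!F.2.contains j) = true) ↔ j ∉ F.2 := by simp
      rw [hb, hremmem j]
      tauto
    refine ⟨by rw [l1]; exact g1, by rw [l2]; exact g2, by rw [l3]; exact g3,
      by simpa using g4, (l4 ▸ g5).filter _, ?_, ?_⟩
    · intro i hi
      rw [List.mem_filter, l4] at hi
      exact g6 i hi.1
    · intro j hj
      have hrel := g7 j hj
      have hjw : j < ws.length := by omega
      rw [mapGetD_wstep ws _ j hjw]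
      have hproj : projA { F.1 with active := F.1.active.filter (fun i => !(F.2.contains i)) } j = projA F.1 j := rfl
      by_cases hjact : j ∈ st.active
      · -- word j was active: it really steps
        have hcj : st.active.contains j = true := List.elem_iff.mpr hjact
        rw [hcj] at hrel
        cases hw : ws.getD j (.done 0) with
        | done v => rw [hw] at hrel; exact absurd hrel.1 (by simp)
        | run nd pp =>
          rw [hw] at hrel
          have hstep := aOne_wstep (needed.getD j PySem.Dict.empty) (total.getD j 0) p.1 p.2
            (projA st j) nd pp (hcont j hj) hrel
          have hq : projA { F.1 with active := F.1.active.filter (fun i => !(F.2.contains i)) } j =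
              ((aOneAt needed total p.1 p.2 st j).1, (aOneAt needed total p.1 p.2 st j).2.1,
               (aOneAt needed total p.1 p.2 st j).2.2.1) := by
            rw [hproj, l6 j, if_pos hjact]
          rw [hq]
          have hact' : (F.1.active.filter (fun i => !(F.2.contains i))).contains j =
              !(aOneAt needed total p.1 p.2 st j).2.2.2 := by
            by_cases hfl : (aOneAt needed total p.1 p.2 st j).2.2.2 = true
            · have hnm : j ∉ F.1.active.filter (fun i => !(F.2.contains i)) :=
                fun hmem => ((hactmem j).mp hmem).2 hfl
              have hc : (F.1.active.filter (fun i => !(F.2.contains i))).contains j = false := by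
                rw [Bool.eq_false_iff]
                exact fun hc => hnm (List.elem_iff.mp hc)
              rw [hc, hfl]
              rfl
            · have hm : j ∈ F.1.active.filter (fun i => !(F.2.contains i)) :=
                (hactmem j).mpr ⟨hjact, hfl⟩
              simp only [Bool.not_eq_true] at hfl
              have hc2 : (F.1.active.filter (fun i => !(F.2.contains i))).contains j = true :=
                List.elem_iff.mpr hm
              rw [hc2, hfl]
              rfl
          rw [hact']
          exact hstep
      · -- word j inactive: untouched, and its abstract state is done
        have hcj : st.active.contains j = false := by
          simp [hjact]
        rw [hcj] at hrel
        cases hw : ws.getD j (.done 0) with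
        | run nd pp => rw [hw] at hrel; exact absurd hrel.1 (by simp)
        | done v =>
          rw [hw] at hrel
          have hq : projA { F.1 with active := F.1.active.filter (fun i => !(F.2.contains i)) } j = projA st j := by
            rw [hproj, l6 j, if_neg hjact]
          have hact' : (F.1.active.filter (fun i => !(F.2.contains i))).contains j = false := by
            have hnm : j ∉ F.1.active.filter (fun i => !(F.2.contains i)) :=
              fun hmem => hjact ((hactmem j).mp hmem).1
            rw [Bool.eq_false_iff]
            exact fun hc => hnm (List.elem_iff.mp hc)
          rw [hq, hact']
          exact ⟨rfl, hrel.2⟩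

theorem good_fold (needed : List (PySem.Dict Char Int)) (total : List Int)
    (ps : List (Int × Char))
    (hcont : ∀ j, j < needed.length → ∀ ch',
      (needed.getD j PySem.Dict.empty).contains ch' = true ↔ 0 < (needed.getD j PySem.Dict.empty).getD ch' 0) :
    ∀ (st : AState) (ws : List WSt), GoodA needed total st ws →
    GoodA needed total (ps.foldl (aStep needed total) st)
      (ps.foldl (fun ws q => ws.map (wstep q.1 q.2)) ws) := by
  induction ps with
  | nil => intro st ws h; exact h
  | cons p rest ih =>
    intro st ws h
    exact ih _ _ (good_step needed total st ws p hcont h)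

theorem foldl_map_wrun (ps : List (Int × Char)) : ∀ (ws : List WSt),
    ps.foldl (fun ws q => ws.map (wstep q.1 q.2)) ws = ws.map (wrun ps) := by
  induction ps with
  | nil => intro ws; simp [show wrun ([] : List (Int × Char)) = id from funext fun _ => rfl]
  | cons p rest ih =>
    intro ws
    have : wrun (p :: rest) = fun w => wrun rest (wstep p.1 p.2 w) := by
      funext w; rfl
    simp [List.foldl_cons, ih, List.map_map, this, Function.comp]

-- characterisation of A: the j-th result is the per-word abstract run
theorem a_char (s : String) (arr : List String) :
    (countMinimumCharacters s arr).length = arr.length ∧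
    ∀ j (hj : j < arr.length),
      (countMinimumCharacters s arr).getD j (-1) =
        wext (wrun (PySem.List.enumerate s.toList 0)
          (.run (PySem.Dict.counter (arr[j].toList)) ((PySem.Dict.counter (arr[j].toList)).size : Int))) := by
  set needed := arr.map (fun w => PySem.Dict.counter w.toList) with hneed
  set total := needed.map (fun c => (c.size : Int)) with htot
  have hnlen : needed.length = arr.length := by simp [hneed]
  have htlen : total.length = arr.length := by simp [htot, hnlen]
  have hneedj : ∀ j (hj : j < arr.length),
      needed.getD j PySem.Dict.empty = PySem.Dict.counter (arr[j].toList) := by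
    intro j hj
    rw [List.getD_eq_getElem _ _ (by omega)]
    simp [hneed]
  have htotj : ∀ j (hj : j < arr.length),
      total.getD j 0 = ((PySem.Dict.counter (arr[j].toList)).size : Int) := by
    intro j hj
    rw [List.getD_eq_getElem _ _ (by omega)]
    simp [htot, hneed]
  have hcont : ∀ j, j < needed.length → ∀ ch',
      (needed.getD j PySem.Dict.empty).contains ch' = true ↔ 0 < (needed.getD j PySem.Dict.empty).getD ch' 0 := by
    intro j hj ch'
    rw [hneedj j (by omega), PySem.Dict.contains_counter, PySem.Dict.getD_counter]
    rw [List.elem_iff]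
    constructor
    · intro h
      have := List.count_pos_iff.mpr h
      omega
    · intro h
      exact List.count_pos_iff.mp (by omega)
  set init : AState := ⟨List.replicate arr.length PySem.Dict.empty, List.replicate arr.length 0,
                        List.replicate arr.length (-1), List.range arr.length⟩ with hinit
  set ws0 : List WSt := (List.range arr.length).map
    (fun j => WSt.run (needed.getD j PySem.Dict.empty) (total.getD j 0)) with hws0
  have hws0j : ∀ j, j < arr.length → ws0.getD j (.done 0) =
      .run (needed.getD j PySem.Dict.empty) (total.getD j 0) := by
    intro j hj
    rw [List.getD_eq_getElem _ _ (by simp [hws0]; omega)]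
    simp [hws0]
  have hgood0 : GoodA needed total init ws0 := by
    refine ⟨by simp [hinit, hnlen], by simp [hinit, hnlen], by simp [hinit, hnlen],
      by simp [hws0, hnlen], by simp [hinit, List.nodup_range], ?_, ?_⟩
    · intro i hi
      simp only [hinit, List.mem_range] at hi
      omega
    · intro j hj
      have hjn : j < arr.length := by omega
      rw [hws0j j hjn]
      have hact : init.active.contains j = true := by
        simp [hinit, List.mem_range, hjn]
      rw [hact]
      refine ⟨rfl, ?_, ?_, ?_⟩
      · show (List.replicate arr.length (-1 : Int)).getD j (-1) = -1
        rw [List.getD_eq_getElem _ _ (by simp [hjn])]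
        simp
      · show (List.replicate arr.length (0 : Int)).getD j 0 + total.getD j 0 = total.getD j 0
        rw [List.getD_eq_getElem _ _ (by simp [hjn])]
        simp
      · intro ch
        have hm : (projA init j).1 = PySem.Dict.empty := by
          show (List.replicate arr.length PySem.Dict.empty).getD j PySem.Dict.empty = _
          rw [List.getD_eq_getElem _ _ (by simp [hjn])]
          simp
        rw [hm, hneedj j hjn, PySem.Dict.getD_empty, PySem.Dict.getD_counter]
        refine ⟨le_refl 0, by positivity, by omega⟩
  have hfinal := good_fold needed total (PySem.List.enumerate s.toList 0) hcont init ws0 hgood0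
  rw [foldl_map_wrun] at hfinal
  obtain ⟨f1, f2, f3, f4, f5, f6, f7⟩ := hfinal
  have hres : countMinimumCharacters s arr =
      ((PySem.List.enumerate s.toList 0).foldl (aStep needed total) init).result := rfl
  constructor
  · rw [hres, f3, hnlen]
  · intro j hj
    have hjn : j < needed.length := by omega
    have hrel := f7 j hjn
    have hwsm : (ws0.map (wrun (PySem.List.enumerate s.toList 0))).getD j (.done 0) =
        wrun (PySem.List.enumerate s.toList 0) (ws0.getD j (.done 0)) :=
      mapGetD_wstep _ _ j (by simp [hws0]; omega)
    rw [hwsm, hws0j j (by omega), hneedj j (by omega), htotj j (by omega)] at hrel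
    rw [hres]
    cases hw : wrun (PySem.List.enumerate s.toList 0)
        (.run (PySem.Dict.counter (arr[j].toList)) ((PySem.Dict.counter (arr[j].toList)).size : Int)) with
    | done v =>
      rw [hw] at hrel
      exact hrel.2
    | run nd pp =>
      rw [hw] at hrel
      exact hrel.2.1

theorem b_char (s : String) (arr : List String) :
    (countMinimumCharacters_alt s arr).length = arr.length ∧
    ∀ j (hj : j < arr.length),
      (countMinimumCharacters_alt s arr).getD j (-1) =
        wext (wrun (PySem.List.enumerate s.toList 0)
          (.run (PySem.Dict.counter (arr[j].toList)) ((PySem.Dict.counter (arr[j].toList)).size : Int))) := by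
  constructor
  · simp [countMinimumCharacters_alt]
  · intro j hj
    rw [List.getD_eq_getElem _ _ (by simpa [countMinimumCharacters_alt] using hj)]
    simp only [countMinimumCharacters_alt, List.getElem_map]
    rw [bLoop_eq_wrun]


-- ===== VERDICT (by name: the statement is the Claim_ definition above) =====
theorem countMinimumCharacters_spec : Claim_equal_countMinimumCharacters := by
  intro s arr _
  obtain ⟨hAlen, hAget⟩ := a_char s arr
  obtain ⟨hBlen, hBget⟩ := b_char s arr
  apply List.ext_getElem (by rw [hAlen, hBlen])
  intro j h1 h2
  have hj : j < arr.length := by omega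
  rw [← List.getD_eq_getElem _ (-1) h1, ← List.getD_eq_getElem _ (-1) h2,
    hAget j hj, hBget j hj]
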